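-- pv_equiv track=rewrite | github.com/Marshal1101/DataStructure-Algorithm-Study | programmers/탐욕법/02-42860-조이스틱.py | solution
-- ===== SOURCE A (Python) =====
-- import collections
--
-- def solution(name):
--     def get_index(idx, d, L) :
--         new_idx = idx + d
--         if new_idx == -1 : new_idx = L - 1
--         elif new_idx == L : new_idx = 0
--         return new_idx
--
--     def get_updown(a) :
--         res = 0
--         a_ascii = ord(a)
--         if a_ascii < 78 : res = a_ascii - 65
--         elif a_ascii > 78 : res = 91 - a_ascii
--         else : res = 13
--         return res
--
--     def get_move_cnt(clist, L, step) :
--         path = []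
--         cnt = 0
--         if clist[0] :
--             path.append(0)
--             cnt += 1
--         que = collections.deque([(0, cnt, 0, path)])
--         move = 0
--         while que :
--             length = len(que)
--
--             for _ in range(length) :
--                 idx, cnt, dir, path = que.popleft()
--                 if cnt == step :
--                     return move
--
--                 if clist[idx] or dir == 0 :
--                     for d in (-1, 1) :
--                         new_idx = get_index(idx, d, L)
--                         if not clist[new_idx] or new_idx in path :
--                             que.append((new_idx, cnt, d, path[:]))
--                         else :
--                             path.append(new_idx)
--                             que.append((new_idx, cnt+1, d, path[:]))
--                             path.pop()
--                 else :
--                     new_idx = get_index(idx, dir, L)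
--                     if not clist[new_idx] or new_idx in path :
--                         que.append((new_idx, cnt, dir, path[:]))
--                     else :
--                         path.append(new_idx)
--                         que.append((new_idx, cnt+1, dir, path[:]))
--                         path.pop()
--
--             move += 1
--
--     if (L := len(name)) == 1 :
--         return get_updown(name[0])
--     else :
--         ans = 0
--         cnt = 0
--         checklist = [False] * L
--         for i in range(L) :
--             if name[i] != "A" :
--                 ans += get_updown(name[i])
--                 cnt += 1
--                 checklist[i] = True
--
--         ans += get_move_cnt(checklist, L, cnt)
--
--     return ans
-- ===== SOURCE B (Python) =====
-- def solution(name):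
--     L = len(name)
--
--     def updown(ch):
--         o = ord(ch)
--         if o < 78:
--             return o - 65
--         if o > 78:
--             return 91 - o
--         return 13
--
--     if L == 1:
--         return updown(name[0])
--
--     vertical = sum(updown(c) for c in name if c != 'A')
--
--     best = L - 1
--     for i in range(L):
--         nxt = i + 1
--         while nxt < L and name[nxt] == 'A':
--             nxt += 1
--         best = min(best, 2 * i + L - nxt, i + 2 * (L - nxt))
--     return vertical + best
-- ===== Notes on version B (the rewrite author's own statement) =====
-- stated objective: faster
-- what changed: Replaced A's breadth-first search over cursor states with copied visit-path lists (queue doubles each level, exponential) by the standard greedy closed scan: for each position i take min(2*i + L - next, i + 2*(L - next)) where next is the first non-'A' position after i.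
-- outside the precondition, e.g. on solution(''): A raises IndexError, B returns -1
import Mathlib
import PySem

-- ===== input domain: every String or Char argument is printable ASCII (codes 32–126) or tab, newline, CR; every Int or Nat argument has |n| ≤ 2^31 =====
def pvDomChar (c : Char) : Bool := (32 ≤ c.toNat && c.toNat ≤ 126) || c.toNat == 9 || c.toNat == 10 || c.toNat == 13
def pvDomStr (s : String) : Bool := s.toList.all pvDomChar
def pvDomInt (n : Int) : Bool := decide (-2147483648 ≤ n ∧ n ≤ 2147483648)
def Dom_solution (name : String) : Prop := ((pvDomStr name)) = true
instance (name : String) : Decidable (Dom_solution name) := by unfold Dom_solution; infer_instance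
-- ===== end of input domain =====

-- B replaces A's breadth-first search over cursor states with copied visit-path lists
-- (queue doubles per level) by the standard greedy per-position left/right split scan;
-- same return value on every non-empty name (A raises IndexError on the empty string).

-- ===== PORT A =====
-- helper get_index(idx, d, L)
def pvGetIndex (idx d L : Int) : Int :=
  let newIdx := idx + d
  if newIdx == -1 then L - 1
  else if newIdx == L then 0
  else newIdx

-- helper get_updown(a)
def pvGetUpdown (a : Char) : Int :=
  let aAscii : Int := (a.toNat : Int)   -- ord(a)
  if aAscii < 78 then aAscii - 65
  else if aAscii > 78 then 91 - aAscii
  else 13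

-- clist[idx]; in A every index reaching this lookup is in range, so the default is dead code
def pvCl (clist : List Bool) (idx : Int) : Bool :=
  (PySem.List.pyGet? clist idx).getD false

-- one BFS state: the tuple (idx, cnt, dir, path) of get_move_cnt
structure PvSt where
  idx : Int
  cnt : Int
  dir : Int
  path : List Int
deriving Repr, DecidableEq

-- the state appended to the deque for one direction d (the shared if/else in both branches)
def pvChild (clist : List Bool) (L : Int) (s : PvSt) (d : Int) : PvSt :=
  let newIdx := pvGetIndex s.idx d L
  if !(pvCl clist newIdx) || s.path.contains newIdx then
    ⟨newIdx, s.cnt, d, s.path⟩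
  else
    ⟨newIdx, s.cnt + 1, d, s.path ++ [newIdx]⟩

-- the states one popped state appends (for d in (-1,1) … / the single-direction else branch)
def pvExpand (clist : List Bool) (L : Int) (s : PvSt) : List PvSt :=
  if pvCl clist s.idx || s.dir == 0 then
    [pvChild clist L s (-1), pvChild clist L s 1]
  else
    [pvChild clist L s s.dir]

-- the inner `for _ in range(length)` loop; none = `return move` fired
def pvInner (clist : List Bool) (L step : Int) : Nat → List PvSt → Option (List PvSt)
  | 0, que => some que
  | Nat.succ _, [] => some []   -- unreachable: the deque is never empty here in A
  | Nat.succ k, s :: rest =>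
      if s.cnt == step then none
      else pvInner clist L step k (rest ++ pvExpand clist L s)

-- the outer `while que` loop; the fuel is proved sufficient below (BFS answers within L-1 levels)
def pvBfs (clist : List Bool) (L step : Int) : Nat → List PvSt → Int → Int
  | 0, _, move => move   -- fuel exhausted: unreachable for the fuel pvGetMoveCnt passes
  | Nat.succ f, que, move =>
      match pvInner clist L step que.length que with
      | none => move
      | some que' => pvBfs clist L step f que' (move + 1)

-- helper get_move_cnt(clist, L, step)
def pvGetMoveCnt (clist : List Bool) (L step : Int) : Int :=
  let cnt : Int := if pvCl clist 0 then 1 else 0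
  let path : List Int := if pvCl clist 0 then [0] else []
  pvBfs clist L step (L.toNat + 2) [⟨0, cnt, 0, path⟩] 0

-- the body of `for i in range(L)`: ans += get_updown(name[i]); cnt += 1; checklist[i] = True
def pvAbody (cs : List Char) (st : Int × Int × List Bool) (i : Int) : Int × Int × List Bool :=
  let c := (PySem.List.pyGet? cs i).getD ' '   -- name[i]; i is in range
  if c ≠ 'A' then
    (st.1 + pvGetUpdown c, st.2.1 + 1, st.2.2.set i.toNat true)
  else st

def solution (name : String) : Int :=
  let cs := name.toList
  let L : Int := PySem.List.len cs
  if L == 1 then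
    pvGetUpdown ((PySem.List.pyGet? cs 0).getD ' ')   -- name[0]; in range since L = 1
  else
    -- ans = 0; cnt = 0; checklist = [False]*L; for i in range(L): …
    let st := (PySem.List.pyRange 0 L 1).foldl (pvAbody cs) (0, 0, List.replicate L.toNat false)
    st.1 + pvGetMoveCnt st.2.2 L st.2.1

-- ===== PORT B =====
def pvUpdownAlt (ch : Char) : Int :=
  let o : Int := (ch.toNat : Int)
  if o < 78 then o - 65
  else if o > 78 then 91 - o
  else 13

-- the `while nxt < L and name[nxt] == 'A': nxt += 1` scan
def pvNxt (cs : List Char) (L : Int) (j : Int) : Int :=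
  if h : j < L ∧ ((PySem.List.pyGet? cs j).getD ' ') = 'A' then pvNxt cs L (j + 1)
  else j
termination_by (L - j).toNat
decreasing_by omega

-- the body of `for i in range(L)`: best = min(best, 2*i + L - nxt, i + 2*(L - nxt))
def pvBbody (cs : List Char) (L : Int) (b : Int) (i : Int) : Int :=
  let nxt := pvNxt cs L (i + 1)
  min (min b (2 * i + L - nxt)) (i + 2 * (L - nxt))

def solution_alt (name : String) : Int :=
  let cs := name.toList
  let L : Int := PySem.List.len cs
  if L == 1 then
    pvUpdownAlt ((PySem.List.pyGet? cs 0).getD ' ')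
  else
    let vertical := (cs.filter (fun c => c ≠ 'A')).foldl (fun a c => a + pvUpdownAlt c) 0
    let best := (PySem.List.pyRange 0 L 1).foldl (pvBbody cs L) (L - 1)
    vertical + best


-- ===== PRECONDITION & SPEC =====
-- Pre_ excludes only the empty string, on which A raises IndexError (clist[0] of an empty list).
def Pre_solution (name : String) : Prop := name.toList ≠ []
instance (name : String) : Decidable (Pre_solution name) := by unfold Pre_solution; infer_instance

def pvWitness_solution : String := "BAB"

def Spec_solution (name : String) (out : Int) : Prop := out = solution_alt name
instance (name : String) (out : Int) : Decidable (Spec_solution name out) := by unfold Spec_solution; infer_instance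

-- ===== CLAIM (what is proved, stated in full; the proofs are below) =====
def Claim_equal_solution : Prop := ∀ (name : String), Dom_solution name → Pre_solution name → Spec_solution name (solution name)

-- ===== LEMMAS AND PROOFS =====

def pvCovers (L lo hi c : Int) : Prop := ∃ w : Int, lo ≤ w ∧ w ≤ hi ∧ w % L = c

def pvPathIff (clist : List Bool) (L : Int) (path : List Int) (lo hi : Int) : Prop :=
  ∀ c : Int, c ∈ path ↔ (pvCl clist c = true ∧ pvCovers L lo hi c)

def pvGood (clist : List Bool) (L : Int) (s : PvSt) (z lo hi : Int) : Prop :=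
  s.idx = z % L ∧ lo ≤ z ∧ z ≤ hi ∧ lo ≤ 0 ∧ 0 ≤ hi ∧
  pvPathIff clist L s.path lo hi ∧ s.path.Nodup ∧ s.cnt = (s.path.length : Int)

theorem pvGetIndex_emod (L z d : Int) (hL : 0 < L) (hd : d = 1 ∨ d = -1) :
    pvGetIndex (z % L) d L = (z + d) % L := by
  have h0 : 0 ≤ z % L := Int.emod_nonneg z (by omega)
  have h1 : z % L < L := Int.emod_lt_of_pos z hL
  have key : (z + d) % L = (z % L + d) % L := by
    conv_lhs => rw [show z + d = (z % L + d) + L * (z / L) by rw [Int.emod_def]; ring]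
    rw [Int.add_mul_emod_self_left]
  unfold pvGetIndex
  rcases hd with rfl | rfl
  · by_cases h2 : z % L + 1 = L
    · simp only [h2]
      simp [key, h2, Int.emod_self]
      omega
    · have : (z % L + 1) % L = z % L + 1 := Int.emod_eq_of_lt (by omega) (by omega)
      simp only [key, this]
      simp
      omega
  · by_cases h2 : z % L - 1 = -1
    · have : (z % L + -1) % L = L - 1 := by
        rw [show z % L + -1 = -1 by omega]
        rw [show (-1 : Int) = (L - 1) - L * 1 by ring, Int.sub_mul_emod_self_left]
        exact Int.emod_eq_of_lt (by omega) (by omega)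
      simp [key, this]
      omega
    · have : (z % L + -1) % L = z % L - 1 := by
        rw [show z % L + -1 = z % L - 1 by ring]
        exact Int.emod_eq_of_lt (by omega) (by omega)
      simp only [key, this]
      simp
      omega

theorem pvCovers_ext (L lo hi z d : Int) (hd : d = 1 ∨ d = -1) (hlo : lo ≤ z) (hhi : z ≤ hi) (c : Int) :
    pvCovers L (min lo (z + d)) (max hi (z + d)) c ↔ (pvCovers L lo hi c ∨ c = (z + d) % L) := by
  constructor
  · rintro ⟨w, h1, h2, rfl⟩
    by_cases hw : lo ≤ w ∧ w ≤ hi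
    · exact Or.inl ⟨w, hw.1, hw.2, rfl⟩
    · have : w = z + d := by rcases hd with rfl | rfl <;> omega
      subst this; exact Or.inr rfl
  · rintro (⟨w, h1, h2, h3⟩ | rfl)
    · exact ⟨w, by omega, by omega, h3⟩
    · exact ⟨z + d, by omega, by omega, rfl⟩

theorem pvChild_good (clist : List Bool) (L : Int) (s : PvSt) (z lo hi d : Int)
    (hL : 0 < L) (hd : d = 1 ∨ d = -1) (hg : pvGood clist L s z lo hi) :
    pvGood clist L (pvChild clist L s d) (z + d) (min lo (z + d)) (max hi (z + d)) ∧
    (pvChild clist L s d).dir = d ∧ (pvChild clist L s d).idx = (z + d) % L := by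
  obtain ⟨hidx, hlo, hhi, hlo0, hhi0, hpath, hnd, hcnt⟩ := hg
  have hni : pvGetIndex s.idx d L = (z + d) % L := by rw [hidx]; exact pvGetIndex_emod L z d hL hd
  have hext := pvCovers_ext L lo hi z d hd hlo hhi
  by_cases hnew : pvCl clist ((z + d) % L) = true ∧ (z + d) % L ∉ s.path
  · -- the counted branch: path grows
    have hchild : pvChild clist L s d = ⟨(z + d) % L, s.cnt + 1, d, s.path ++ [(z + d) % L]⟩ := by
      have hcont : s.path.contains ((z + d) % L) = false := by
        simp [List.contains_iff_mem, hnew.2]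
      simp [pvChild, hni, hnew.1, hcont, hnew.2]
    rw [hchild]
    refine ⟨⟨rfl, by omega, by omega, by omega, by omega, ?_, ?_, ?_⟩, rfl, rfl⟩
    · intro c
      rw [hext]
      simp only [List.mem_append, List.mem_singleton]
      constructor
      · rintro (hc | rfl)
        · exact ⟨((hpath c).1 hc).1, Or.inl ((hpath c).1 hc).2⟩
        · exact ⟨hnew.1, Or.inr rfl⟩
      · rintro ⟨hc1, hc2 | rfl⟩
        · exact Or.inl ((hpath c).2 ⟨hc1, hc2⟩)
        · exact Or.inr rfl
    · simp only [List.nodup_append, List.nodup_singleton, true_and]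
      refine ⟨hnd, fun a ha b hb => ?_⟩
      simp only [List.mem_singleton] at hb
      intro h; rw [h, hb] at ha; exact hnew.2 ha
    · simp [hcnt]
  · -- the uncounted branch: path unchanged
    have hchild : pvChild clist L s d = ⟨(z + d) % L, s.cnt, d, s.path⟩ := by
      by_cases hcl : pvCl clist ((z + d) % L) = true
      · have hmem : (z + d) % L ∈ s.path := by tauto
        have hcont : s.path.contains ((z + d) % L) = true := by
          simpa [List.contains_iff_mem] using hmem
        simp [pvChild, hni, hcl, hcont, hmem]
      · simp only [Bool.not_eq_true] at hcl
        simp [pvChild, hni, hcl]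
    rw [hchild]
    refine ⟨⟨rfl, by omega, by omega, by omega, by omega, ?_, hnd, hcnt⟩, rfl, rfl⟩
    intro c
    rw [hext]
    constructor
    · intro hc
      exact ⟨((hpath c).1 hc).1, Or.inl ((hpath c).1 hc).2⟩
    · rintro ⟨hc1, hc2 | rfl⟩
      · exact (hpath c).2 ⟨hc1, hc2⟩
      · by_cases hcl : pvCl clist ((z + d) % L) = true
        · have : (z + d) % L ∈ s.path := by tauto
          exact this
        · rw [hc1] at hcl; exact absurd rfl hcl

def pvLvl (clist : List Bool) (L : Int) (s0 : PvSt) : Nat → List PvSt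
  | 0 => [s0]
  | m + 1 => (pvLvl clist L s0 m).flatMap (pvExpand clist L)

theorem pvExpand_mem_elim (clist : List Bool) (L : Int) (s s' : PvSt)
    (h : s' ∈ pvExpand clist L s) (hdir : s.dir = 0 ∨ s.dir = 1 ∨ s.dir = -1) :
    ∃ d, (d = 1 ∨ d = -1) ∧ s' = pvChild clist L s d := by
  unfold pvExpand at h
  split at h
  · simp only [List.mem_cons, List.not_mem_nil, or_false] at h
    rcases h with h | h
    · exact ⟨-1, Or.inr rfl, h⟩
    · exact ⟨1, Or.inl rfl, h⟩
  · rename_i hc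
    simp only [List.mem_singleton] at h
    rcases hdir with h0 | h1 | h1
    · simp [h0] at hc
    · exact ⟨1, Or.inl rfl, by rw [h, h1]⟩
    · exact ⟨-1, Or.inr rfl, by rw [h, h1]⟩

theorem pvExpand_mem_intro (clist : List Bool) (L : Int) (s : PvSt) (d : Int)
    (hd : d = 1 ∨ d = -1) (hok : pvCl clist s.idx = true ∨ s.dir = 0 ∨ d = s.dir) :
    pvChild clist L s d ∈ pvExpand clist L s := by
  unfold pvExpand
  split
  · rcases hd with h | h <;> rw [h] <;> simp
  · rename_i hc
    have : ¬ pvCl clist s.idx = true ∧ ¬ s.dir = 0 := by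
      constructor <;> intro h <;> simp [h] at hc
    rcases hok with h | h | h
    · exact absurd h this.1
    · exact absurd h this.2
    · simp [← h]

def pvMetric (z lo hi : Int) : Int := (hi - lo) + min ((hi - z) + (-lo)) ((z - lo) + hi)

theorem pvLvl_inv (clist : List Bool) (L : Int) (s0 : PvSt)
    (hL : 0 < L) (hs0 : pvGood clist L s0 0 0 0) (hd0 : s0.dir = 0) :
    ∀ m s, s ∈ pvLvl clist L s0 m →
      ∃ z lo hi, pvGood clist L s z lo hi ∧ (s.dir = 0 ∨ s.dir = 1 ∨ s.dir = -1) ∧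
        pvMetric z lo hi ≤ (m : Int) := by
  intro m
  induction m with
  | zero =>
    intro s hs
    simp only [pvLvl, List.mem_singleton] at hs
    subst hs
    exact ⟨0, 0, 0, hs0, Or.inl hd0, by simp [pvMetric]⟩
  | succ m ih =>
    intro s hs
    simp only [pvLvl, List.mem_flatMap] at hs
    obtain ⟨t, ht, hst⟩ := hs
    obtain ⟨z, lo, hi, hg, hdir, hm⟩ := ih t ht
    obtain ⟨d, hd, rfl⟩ := pvExpand_mem_elim clist L t s hst hdir
    obtain ⟨hg', hdir', _⟩ := pvChild_good clist L t z lo hi d hL hd hg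
    refine ⟨z + d, min lo (z + d), max hi (z + d), hg', ?_, ?_⟩
    · rw [hdir']; rcases hd with rfl | rfl <;> simp
    · obtain ⟨_, h1, h2, h3, h4, _⟩ := hg
      unfold pvMetric at hm ⊢
      push_cast
      rcases hd with rfl | rfl <;> omega

theorem pvInner_spec (clist : List Bool) (L step : Int) :
    ∀ (q1 q2 : List PvSt),
      pvInner clist L step q1.length (q1 ++ q2) =
        if ∃ s ∈ q1, s.cnt = step then none
        else some (q2 ++ q1.flatMap (pvExpand clist L)) := by
  intro q1
  induction q1 with
  | nil => intro q2; simp [pvInner]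
  | cons s rest ih =>
    intro q2
    simp only [List.length_cons, List.cons_append, pvInner]
    by_cases hs : s.cnt = step
    · simp [hs]
    · have hbe : (s.cnt == step) = false := by simp [hs]
      rw [hbe]
      simp only [Bool.false_eq_true, if_false]
      rw [show rest ++ q2 ++ pvExpand clist L s = rest ++ (q2 ++ pvExpand clist L s) by simp]
      rw [ih (q2 ++ pvExpand clist L s)]
      by_cases hex : ∃ t ∈ rest, t.cnt = step
      · simp [hex, hs]
      · have : ¬ ∃ t ∈ s :: rest, t.cnt = step := by
          simp only [List.mem_cons]
          rintro ⟨t, ht | ht, hc⟩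
          · exact hs (ht ▸ hc)
          · exact hex ⟨t, ht, hc⟩
        simp only [hex, this, if_false]
        simp [List.flatMap_cons]

theorem pvBfs_run (clist : List Bool) (L step : Int) (s0 : PvSt) (μ : Nat)
    (hfull : ∃ s ∈ pvLvl clist L s0 μ, s.cnt = step)
    (hmin : ∀ k, k < μ → ¬ ∃ s ∈ pvLvl clist L s0 k, s.cnt = step) :
    ∀ (f m : Nat), m ≤ μ → μ < m + f →
      pvBfs clist L step f (pvLvl clist L s0 m) (m : Int) = (μ : Int) := by
  intro f
  induction f with
  | zero => intro m h1 h2; omega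
  | succ f ih =>
    intro m h1 h2
    rw [pvBfs]
    have hq : pvLvl clist L s0 m ++ ([] : List PvSt) = pvLvl clist L s0 m := by simp
    rw [show pvInner clist L step (pvLvl clist L s0 m).length (pvLvl clist L s0 m) =
          pvInner clist L step (pvLvl clist L s0 m).length (pvLvl clist L s0 m ++ []) by rw [hq]]
    rw [pvInner_spec]
    by_cases hm : m = μ
    · subst hm; rw [if_pos hfull]
    · rw [if_neg (hmin m (by omega))]
      simp only [List.nil_append]
      have : (pvLvl clist L s0 m).flatMap (pvExpand clist L) = pvLvl clist L s0 (m + 1) := rfl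
      rw [this, show ((m : Int) + 1) = ((m + 1 : Nat) : Int) by push_cast; ring]
      exact ih (m + 1) (by omega) (by omega)

-- generic bounds for the foldl-of-min loop of B
theorem pvFoldMin_le_init (x y : Int → Int) :
    ∀ (l : List Int) (b : Int), l.foldl (fun b i => min (min b (x i)) (y i)) b ≤ b := by
  intro l
  induction l with
  | nil => intro b; simp
  | cons i t ih =>
    intro b
    calc t.foldl (fun b i => min (min b (x i)) (y i)) (min (min b (x i)) (y i))
        ≤ min (min b (x i)) (y i) := ih _
      _ ≤ b := by omega

theorem pvFoldMin_le_mem (x y : Int → Int) :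
    ∀ (l : List Int) (b : Int) (i : Int), i ∈ l →
      l.foldl (fun b i => min (min b (x i)) (y i)) b ≤ min (x i) (y i) := by
  intro l
  induction l with
  | nil => intro b i hi; cases hi
  | cons j t ih =>
    intro b i hi
    rcases List.mem_cons.mp hi with rfl | hi
    · calc t.foldl (fun b i => min (min b (x i)) (y i)) (min (min b (x i)) (y i))
          ≤ min (min b (x i)) (y i) := pvFoldMin_le_init x y t _
        _ ≤ min (x i) (y i) := by omega
    · exact ih _ i hi

theorem pvFoldMin_cases (x y : Int → Int) :
    ∀ (l : List Int) (b : Int),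
      l.foldl (fun b i => min (min b (x i)) (y i)) b = b ∨
      ∃ i ∈ l, l.foldl (fun b i => min (min b (x i)) (y i)) b = min (x i) (y i) := by
  intro l
  induction l with
  | nil => intro b; exact Or.inl rfl
  | cons j t ih =>
    intro b
    rcases ih (min (min b (x j)) (y j)) with h | ⟨i, hi, h⟩
    · simp only [List.foldl_cons]
      by_cases hb : min (min b (x j)) (y j) = b
      · exact Or.inl (by rw [h, hb])
      · refine Or.inr ⟨j, List.mem_cons_self, ?_⟩
        rw [h]; omega
    · exact Or.inr ⟨i, List.mem_cons_of_mem _ hi, h⟩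

def pvChAt (cs : List Char) (i : Int) : Char := (PySem.List.pyGet? cs i).getD ' '
def pvMarkAt (cs : List Char) (i : Int) : Bool := pvChAt cs i ≠ 'A'
def pvCheck (cs : List Char) : List Bool := (List.range cs.length).map (fun j : Nat => pvMarkAt cs (j : Int))
def pvAM (cs : List Char) : List Int := ((List.range cs.length).map (fun j : Nat => (j : Int))).filter (fun c => pvMarkAt cs c)

theorem pvCl_check (cs : List Char) (c : Int) (h0 : 0 ≤ c) (h1 : c < (cs.length : Int)) :
    pvCl (pvCheck cs) c = pvMarkAt cs c := by
  unfold pvCl pvCheck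
  rw [PySem.List.pyGet?_of_nonneg _ h0]
  have hc : c.toNat < cs.length := by omega
  rw [List.getElem?_map, List.getElem?_range hc]
  simp only [Option.map_some, Option.getD_some]
  congr 1
  omega

theorem pvAM_mem (cs : List Char) (c : Int) :
    c ∈ pvAM cs ↔ (0 ≤ c ∧ c < (cs.length : Int) ∧ pvMarkAt cs c = true) := by
  unfold pvAM
  simp only [List.mem_filter, List.mem_map, List.mem_range]
  constructor
  · rintro ⟨⟨j, hj, rfl⟩, hm⟩
    exact ⟨by omega, by omega, hm⟩
  · rintro ⟨h0, h1, hm⟩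
    exact ⟨⟨c.toNat, by omega, by omega⟩, hm⟩

theorem pvAM_nodup (cs : List Char) : (pvAM cs).Nodup := by
  apply List.Nodup.filter
  exact (List.nodup_range).map (fun a b h => by exact_mod_cast h)

-- two nodup lists of equal length, one contained in the other, have the same members
theorem pvSetEq_of_subset_of_le (l₁ l₂ : List Int) (h₁ : l₁.Nodup) (h₂ : l₂.Nodup)
    (hsub : ∀ c ∈ l₁, c ∈ l₂) (hlen : l₂.length ≤ l₁.length) : ∀ c ∈ l₂, c ∈ l₁ := by
  have hfin : l₁.toFinset ⊆ l₂.toFinset := by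
    intro c hc; rw [List.mem_toFinset] at *; exact hsub c hc
  have hc1 : l₁.toFinset.card = l₁.length := List.toFinset_card_of_nodup h₁
  have hc2 : l₂.toFinset.card = l₂.length := List.toFinset_card_of_nodup h₂
  have : l₂.toFinset = l₁.toFinset :=
    (Finset.eq_of_subset_of_card_le hfin (by omega)).symm
  intro c hc
  rw [← List.mem_toFinset, ← this, List.mem_toFinset]; exact hc

theorem pvLenEq_of_subsets (l₁ l₂ : List Int) (h₁ : l₁.Nodup) (h₂ : l₂.Nodup)
    (hsub : ∀ c ∈ l₁, c ∈ l₂) (hsup : ∀ c ∈ l₂, c ∈ l₁) : l₁.length = l₂.length := by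
  have : l₁.toFinset = l₂.toFinset := by
    ext c; rw [List.mem_toFinset, List.mem_toFinset]; exact ⟨hsub c, hsup c⟩
  rw [← List.toFinset_card_of_nodup h₁, ← List.toFinset_card_of_nodup h₂, this]

theorem pvNxt_spec (cs : List Char) (L : Int) :
    ∀ (fuel : Nat) (j : Int), (L - j).toNat ≤ fuel →
      j ≤ pvNxt cs L j ∧ (j ≤ L → pvNxt cs L j ≤ L) ∧
      (∀ k, j ≤ k → k < pvNxt cs L j → pvChAt cs k = 'A') ∧
      (pvNxt cs L j < L → ¬ pvChAt cs (pvNxt cs L j) = 'A') := by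
  intro fuel
  induction fuel with
  | zero =>
    intro j hj
    have hstop : pvNxt cs L j = j := by
      rw [pvNxt, dif_neg]; rintro ⟨h1, _⟩; omega
    rw [hstop]
    exact ⟨le_refl j, fun h => h, fun k h1 h2 => absurd (lt_of_le_of_lt h1 h2) (lt_irrefl j),
      fun h => by omega⟩
  | succ fuel ih =>
    intro j hj
    by_cases hc : j < L ∧ pvChAt cs j = 'A'
    · have hstep : pvNxt cs L j = pvNxt cs L (j + 1) := by
        rw [pvNxt]; rw [dif_pos]; exact ⟨hc.1, hc.2⟩
      obtain ⟨i1, i2, i3, i4⟩ := ih (j + 1) (by omega)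
      rw [hstep]
      refine ⟨by omega, fun _ => i2 (by omega), ?_, i4⟩
      intro k hk1 hk2
      by_cases hkj : k = j
      · rw [hkj]; exact hc.2
      · exact i3 k (by omega) hk2
    · have hstop : pvNxt cs L j = j := by
        rw [pvNxt, dif_neg (fun h => hc ⟨h.1, h.2⟩)]
      rw [hstop]
      refine ⟨le_refl j, fun h => h, fun k h1 h2 => absurd (lt_of_le_of_lt h1 h2) (lt_irrefl j), ?_⟩
      intro h hA
      exact hc ⟨h, hA⟩

theorem pvNxt_congr (cs : List Char) (L : Int) :
    ∀ (fuel : Nat) (j j' : Int), (j' - j).toNat ≤ fuel → j ≤ j' → j' ≤ L →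
      (∀ k, j ≤ k → k < j' → pvChAt cs k = 'A') → pvNxt cs L j = pvNxt cs L j' := by
  intro fuel
  induction fuel with
  | zero =>
    intro j j' h1 h2 _ _
    have : j = j' := by omega
    rw [this]
  | succ fuel ih =>
    intro j j' h1 h2 h3 h4
    by_cases hjj : j = j'
    · rw [hjj]
    · have hstep : pvNxt cs L j = pvNxt cs L (j + 1) := by
        rw [pvNxt, dif_pos]; exact ⟨by omega, h4 j (le_refl j) (by omega)⟩
      rw [hstep]
      exact ih (j + 1) j' (by omega) (by omega) h3 (fun k hk1 hk2 => h4 k (by omega) hk2)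

def pvWR (clist : List Bool) (L : Int) (s0 : PvSt) : Nat → PvSt
  | 0 => s0
  | k + 1 => pvChild clist L (pvWR clist L s0 k) 1

def pvWRL (clist : List Bool) (L : Int) (s0 : PvSt) (a : Nat) : Nat → PvSt
  | 0 => pvWR clist L s0 a
  | k + 1 => pvChild clist L (pvWRL clist L s0 a k) (-1)

def pvWL (clist : List Bool) (L : Int) (s0 : PvSt) : Nat → PvSt
  | 0 => s0
  | k + 1 => pvChild clist L (pvWL clist L s0 k) (-1)

def pvWLR (clist : List Bool) (L : Int) (s0 : PvSt) (a : Nat) : Nat → PvSt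
  | 0 => pvWL clist L s0 a
  | k + 1 => pvChild clist L (pvWLR clist L s0 a k) 1

theorem pvWR_spec (clist : List Bool) (L : Int) (s0 : PvSt)
    (hL : 0 < L) (hs0 : pvGood clist L s0 0 0 0) (hd0 : s0.dir = 0) :
    ∀ k : Nat, pvWR clist L s0 k ∈ pvLvl clist L s0 k ∧
      pvGood clist L (pvWR clist L s0 k) (k : Int) 0 (k : Int) ∧
      (pvWR clist L s0 k).dir = (if k = 0 then 0 else 1) := by
  intro k
  induction k with
  | zero => exact ⟨by simp [pvLvl, pvWR], hs0, by simp [pvWR, hd0]⟩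
  | succ k ih =>
    obtain ⟨hmem, hg, hdir⟩ := ih
    obtain ⟨hg', hdir', _⟩ := pvChild_good clist L _ (k : Int) 0 (k : Int) 1 hL (Or.inl rfl) hg
    have e1 : min (0 : Int) ((k : Int) + 1) = 0 := by omega
    have e2 : max ((k : Int)) ((k : Int) + 1) = (k : Int) + 1 := by omega
    rw [e1, e2] at hg'
    refine ⟨?_, by push_cast; exact hg', by simp [pvWR, hdir']⟩
    show pvChild clist L (pvWR clist L s0 k) 1 ∈ (pvLvl clist L s0 k).flatMap (pvExpand clist L)
    rw [List.mem_flatMap]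
    refine ⟨pvWR clist L s0 k, hmem, ?_⟩
    apply pvExpand_mem_intro clist L _ 1 (Or.inl rfl)
    by_cases hk : k = 0
    · rw [hdir, if_pos hk]; exact Or.inr (Or.inl rfl)
    · rw [hdir, if_neg hk]; exact Or.inr (Or.inr rfl)

theorem pvWRL_spec (clist : List Bool) (L : Int) (s0 : PvSt) (a : Nat)
    (hL : 0 < L) (hs0 : pvGood clist L s0 0 0 0) (hd0 : s0.dir = 0)
    (hturn : pvCl clist ((a : Int) % L) = true ∨ a = 0) :
    ∀ b : Nat, pvWRL clist L s0 a b ∈ pvLvl clist L s0 (a + b) ∧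
      pvGood clist L (pvWRL clist L s0 a b) ((a : Int) - b) (min 0 ((a : Int) - b)) (a : Int) ∧
      (pvWRL clist L s0 a b).dir = (if b = 0 then (if a = 0 then 0 else 1) else -1) := by
  intro b
  induction b with
  | zero =>
    obtain ⟨hmem, hg, hdir⟩ := pvWR_spec clist L s0 hL hs0 hd0 a
    have e1 : min (0 : Int) ((a : Int) - (0 : Nat)) = 0 := by push_cast; omega
    refine ⟨by simpa using hmem, ?_, by simpa [pvWRL] using hdir⟩
    rw [e1]
    show pvGood clist L (pvWR clist L s0 a) ((a : Int) - (0:Nat)) 0 (a : Int)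
    push_cast
    simpa using hg
  | succ b ih =>
    obtain ⟨hmem, hg, hdir⟩ := ih
    obtain ⟨hg', hdir', _⟩ :=
      pvChild_good clist L _ ((a : Int) - b) (min 0 ((a : Int) - b)) (a : Int) (-1) hL (Or.inr rfl) hg
    have e1 : min (min 0 ((a : Int) - b)) ((a : Int) - b + -1) = min 0 ((a : Int) - (b + 1 : Nat)) := by
      push_cast; omega
    have e2 : max ((a : Int)) ((a : Int) - b + -1) = (a : Int) := by omega
    have e3 : (a : Int) - b + -1 = (a : Int) - ((b + 1 : Nat) : Int) := by push_cast; ring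
    rw [e1, e2, e3] at hg'
    refine ⟨?_, hg', by simp [pvWRL, hdir']⟩
    have : a + (b + 1) = (a + b) + 1 := by omega
    rw [this]
    show pvChild clist L (pvWRL clist L s0 a b) (-1) ∈ (pvLvl clist L s0 (a + b)).flatMap (pvExpand clist L)
    rw [List.mem_flatMap]
    refine ⟨pvWRL clist L s0 a b, hmem, ?_⟩
    apply pvExpand_mem_intro clist L _ (-1) (Or.inr rfl)
    by_cases hb : b = 0
    · rcases hturn with ht | ht
      · left
        have hidx : (pvWRL clist L s0 a b).idx = ((a : Int) - b) % L := hg.1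
        rw [hidx, hb]
        simpa using ht
      · right; left
        rw [hdir, if_pos hb, if_pos ht]
    · right; right
      rw [hdir, if_neg hb]

theorem pvWL_spec (clist : List Bool) (L : Int) (s0 : PvSt)
    (hL : 0 < L) (hs0 : pvGood clist L s0 0 0 0) (hd0 : s0.dir = 0) :
    ∀ k : Nat, pvWL clist L s0 k ∈ pvLvl clist L s0 k ∧
      pvGood clist L (pvWL clist L s0 k) (-(k : Int)) (-(k : Int)) 0 ∧
      (pvWL clist L s0 k).dir = (if k = 0 then 0 else -1) := by
  intro k
  induction k with
  | zero => exact ⟨by simp [pvLvl, pvWL], by simpa using hs0, by simp [pvWL, hd0]⟩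
  | succ k ih =>
    obtain ⟨hmem, hg, hdir⟩ := ih
    obtain ⟨hg', hdir', _⟩ := pvChild_good clist L _ (-(k : Int)) (-(k : Int)) 0 (-1) hL (Or.inr rfl) hg
    have e1 : min (-(k : Int)) (-(k : Int) + -1) = -((k + 1 : Nat) : Int) := by push_cast; omega
    have e2 : max (0 : Int) (-(k : Int) + -1) = 0 := by omega
    have e3 : -(k : Int) + -1 = -((k + 1 : Nat) : Int) := by push_cast; ring
    rw [e1, e2, e3] at hg'
    refine ⟨?_, hg', by simp [pvWL, hdir']⟩
    show pvChild clist L (pvWL clist L s0 k) (-1) ∈ (pvLvl clist L s0 k).flatMap (pvExpand clist L)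
    rw [List.mem_flatMap]
    refine ⟨pvWL clist L s0 k, hmem, ?_⟩
    apply pvExpand_mem_intro clist L _ (-1) (Or.inr rfl)
    by_cases hk : k = 0
    · rw [hdir, if_pos hk]; exact Or.inr (Or.inl rfl)
    · rw [hdir, if_neg hk]; exact Or.inr (Or.inr rfl)

theorem pvWLR_spec (clist : List Bool) (L : Int) (s0 : PvSt) (a : Nat)
    (hL : 0 < L) (hs0 : pvGood clist L s0 0 0 0) (hd0 : s0.dir = 0)
    (hturn : pvCl clist ((-(a : Int)) % L) = true ∨ a = 0) :
    ∀ b : Nat, pvWLR clist L s0 a b ∈ pvLvl clist L s0 (a + b) ∧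
      pvGood clist L (pvWLR clist L s0 a b) (-(a : Int) + b) (-(a : Int)) (max 0 ((b : Int) - a)) ∧
      (pvWLR clist L s0 a b).dir = (if b = 0 then (if a = 0 then 0 else -1) else 1) := by
  intro b
  induction b with
  | zero =>
    obtain ⟨hmem, hg, hdir⟩ := pvWL_spec clist L s0 hL hs0 hd0 a
    have e1 : max (0 : Int) (((0 : Nat) : Int) - a) = 0 := by push_cast; omega
    refine ⟨by simpa using hmem, ?_, by simpa [pvWLR] using hdir⟩
    rw [e1]
    show pvGood clist L (pvWL clist L s0 a) (-(a : Int) + ((0 : Nat) : Int)) (-(a : Int)) 0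
    push_cast
    simpa using hg
  | succ b ih =>
    obtain ⟨hmem, hg, hdir⟩ := ih
    obtain ⟨hg', hdir', _⟩ :=
      pvChild_good clist L _ (-(a : Int) + b) (-(a : Int)) (max 0 ((b : Int) - a)) 1 hL (Or.inl rfl) hg
    have e1 : min (-(a : Int)) (-(a : Int) + b + 1) = -(a : Int) := by omega
    have e2 : max (max 0 ((b : Int) - a)) (-(a : Int) + b + 1) = max 0 (((b + 1 : Nat) : Int) - a) := by
      push_cast; omega
    have e3 : -(a : Int) + b + 1 = -(a : Int) + ((b + 1 : Nat) : Int) := by push_cast; ring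
    rw [e1, e2, e3] at hg'
    refine ⟨?_, hg', by simp [pvWLR, hdir']⟩
    have : a + (b + 1) = (a + b) + 1 := by omega
    rw [this]
    show pvChild clist L (pvWLR clist L s0 a b) 1 ∈ (pvLvl clist L s0 (a + b)).flatMap (pvExpand clist L)
    rw [List.mem_flatMap]
    refine ⟨pvWLR clist L s0 a b, hmem, ?_⟩
    apply pvExpand_mem_intro clist L _ 1 (Or.inl rfl)
    by_cases hb : b = 0
    · rcases hturn with ht | ht
      · left
        have hidx : (pvWLR clist L s0 a b).idx = (-(a : Int) + b) % L := hg.1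
        rw [hidx, hb]
        simpa using ht
      · right; left
        rw [hdir, if_pos hb, if_pos ht]
    · right; right
      rw [hdir, if_neg hb]

def pvX (cs : List Char) (i : Int) : Int :=
  2 * i + (cs.length : Int) - pvNxt cs (cs.length : Int) (i + 1)
def pvY (cs : List Char) (i : Int) : Int :=
  i + 2 * ((cs.length : Int) - pvNxt cs (cs.length : Int) (i + 1))
def pvBest (cs : List Char) : Int :=
  (PySem.List.pyRange 0 (cs.length : Int) 1).foldl
    (fun b i => min (min b (pvX cs i)) (pvY cs i)) ((cs.length : Int) - 1)

theorem pvMarkAt_iff (cs : List Char) (i : Int) : pvMarkAt cs i = true ↔ ¬ pvChAt cs i = 'A' := by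
  simp [pvMarkAt]

-- membership in path forces the marked classes covered, and conversely
theorem pvPath_sub_AM (cs : List Char) (path : List Int) (lo hi : Int)
    (hn : 0 < cs.length)
    (hiff : pvPathIff (pvCheck cs) (cs.length : Int) path lo hi) :
    ∀ c ∈ path, c ∈ pvAM cs := by
  intro c hc
  obtain ⟨hcl, w, h1, h2, h3⟩ := (hiff c).1 hc
  have h0 : 0 ≤ c := by rw [← h3]; exact Int.emod_nonneg w (by omega)
  have hlt : c < (cs.length : Int) := by rw [← h3]; exact Int.emod_lt_of_pos w (by omega)
  rw [pvAM_mem]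
  exact ⟨h0, hlt, by rw [← pvCl_check cs c h0 hlt]; exact hcl⟩

theorem pvCnt_of_covered (cs : List Char) (path : List Int) (lo hi : Int)
    (hn : 0 < cs.length)
    (hiff : pvPathIff (pvCheck cs) (cs.length : Int) path lo hi) (hnd : path.Nodup)
    (hcov : ∀ c ∈ pvAM cs, pvCovers (cs.length : Int) lo hi c) :
    path.length = (pvAM cs).length := by
  apply pvLenEq_of_subsets path (pvAM cs) hnd (pvAM_nodup cs) (pvPath_sub_AM cs path lo hi hn hiff)
  intro c hc
  obtain ⟨h0, h1, hm⟩ := (pvAM_mem cs c).1 hc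
  exact (hiff c).2 ⟨by rw [pvCl_check cs c h0 h1]; exact hm, hcov c hc⟩

theorem pvCovered_of_cnt (cs : List Char) (path : List Int) (lo hi : Int)
    (hn : 0 < cs.length)
    (hiff : pvPathIff (pvCheck cs) (cs.length : Int) path lo hi) (hnd : path.Nodup)
    (hlen : (pvAM cs).length ≤ path.length) :
    ∀ c ∈ pvAM cs, pvCovers (cs.length : Int) lo hi c := by
  intro c hc
  have := pvSetEq_of_subset_of_le path (pvAM cs) hnd (pvAM_nodup cs)
    (pvPath_sub_AM cs path lo hi hn hiff) hlen c hc
  exact ((hiff c).1 this).2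

-- no marked cell lies strictly between hi and L + lo when all marked classes are covered
theorem pvGap_bound (cs : List Char) (lo hi : Int)
    (hn : 0 < cs.length) (hlo : lo ≤ 0) (hhi : 0 ≤ hi) (hrange : hi - lo ≤ (cs.length : Int) - 1)
    (hcov : ∀ c ∈ pvAM cs, pvCovers (cs.length : Int) lo hi c) :
    (cs.length : Int) - pvNxt cs (cs.length : Int) (hi + 1) ≤ -lo := by
  set L : Int := (cs.length : Int) with hLdef
  set N : Int := pvNxt cs L (hi + 1) with hNdef
  by_contra hcon
  push_neg at hcon
  have hNlt : N < L + lo := by omega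
  obtain ⟨i1, i2, i3, i4⟩ := pvNxt_spec cs L (L - (hi + 1)).toNat (hi + 1) (le_refl _)
  rw [← hNdef] at i1 i2 i3 i4
  have hN1 : hi + 1 ≤ N := i1
  have hNL : N < L := by omega
  have hNmem : N ∈ pvAM cs := by
    rw [pvAM_mem]
    exact ⟨by omega, hNL, (pvMarkAt_iff cs N).2 (i4 hNL)⟩
  obtain ⟨w, hw1, hw2, hw3⟩ := hcov N hNmem
  have hNself : N % L = N := Int.emod_eq_of_lt (by omega) hNL
  have hdvd : L ∣ w - N := by
    apply Int.dvd_of_emod_eq_zero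
    rw [Int.sub_emod, hw3, hNself]
    simp
  obtain ⟨t, ht⟩ := hdvd
  have htneg : t ≤ -1 := by nlinarith
  have : L * t ≤ -L := by nlinarith
  omega

theorem pvLow (cs : List Char) (s0 : PvSt)
    (hn : 2 ≤ cs.length)
    (hs0 : pvGood (pvCheck cs) (cs.length : Int) s0 0 0 0) (hd0 : s0.dir = 0) :
    ∀ (k : Nat) (s : PvSt), s ∈ pvLvl (pvCheck cs) (cs.length : Int) s0 k →
      s.cnt = ((pvAM cs).length : Int) → pvBest cs ≤ (k : Int) := by
  set L : Int := (cs.length : Int) with hLdef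
  have hL : 0 < L := by omega
  intro k s hmem hcnt
  obtain ⟨z, lo, hi, hg, _, hmet⟩ := pvLvl_inv (pvCheck cs) L s0 hL hs0 hd0 k s hmem
  obtain ⟨hidx, h1, h2, h3, h4, hiff, hnd, hclen⟩ := hg
  have hlen : (pvAM cs).length ≤ s.path.length := by omega
  have hcov := pvCovered_of_cnt cs s.path lo hi (by omega) hiff hnd hlen
  have hinit : pvBest cs ≤ L - 1 := by
    unfold pvBest; rw [← hLdef]; exact pvFoldMin_le_init (pvX cs) (pvY cs) _ _
  unfold pvMetric at hmet
  by_cases hcase : L - 1 ≤ hi - lo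
  · omega
  · have hhiL : hi < L := by omega
    have hmemr : hi ∈ PySem.List.pyRange 0 L 1 := by
      rw [PySem.List.mem_pyRange_one]; omega
    have hble : pvBest cs ≤ min (pvX cs hi) (pvY cs hi) := by
      unfold pvBest; rw [← hLdef]; exact pvFoldMin_le_mem (pvX cs) (pvY cs) _ (L - 1) hi hmemr
    have hgap := pvGap_bound cs lo hi (by omega) h3 h4 (by omega) hcov
    unfold pvX pvY at hble
    rw [← hLdef] at hble hgap
    omega

theorem pvUp (cs : List Char) (s0 : PvSt)
    (hn : 2 ≤ cs.length)
    (hs0 : pvGood (pvCheck cs) (cs.length : Int) s0 0 0 0) (hd0 : s0.dir = 0) :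
    ∃ k : Nat, (k : Int) ≤ pvBest cs ∧
      ∃ s ∈ pvLvl (pvCheck cs) (cs.length : Int) s0 k, s.cnt = ((pvAM cs).length : Int) := by
  set L : Int := (cs.length : Int) with hLdef
  have hL : 0 < L := by omega
  rcases pvFoldMin_cases (pvX cs) (pvY cs) (PySem.List.pyRange 0 L 1) (L - 1) with hc | ⟨i₀, hi₀, hc⟩
  · -- pvBest = L - 1 : the all-right walk of length L-1 covers every cell
    refine ⟨cs.length - 1, ?_, pvWR (pvCheck cs) L s0 (cs.length - 1), ?_, ?_⟩
    · show ((cs.length - 1 : Nat) : Int) ≤ pvBest cs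
      unfold pvBest; rw [← hLdef, hc]; push_cast; omega
    · exact (pvWR_spec (pvCheck cs) L s0 hL hs0 hd0 (cs.length - 1)).1
    · obtain ⟨_, hg, _⟩ := pvWR_spec (pvCheck cs) L s0 hL hs0 hd0 (cs.length - 1)
      obtain ⟨_, _, _, _, _, hiff, hnd, hclen⟩ := hg
      have : (pvWR (pvCheck cs) L s0 (cs.length - 1)).path.length = (pvAM cs).length := by
        apply pvCnt_of_covered cs _ 0 ((cs.length - 1 : Nat) : Int) (by omega) hiff hnd
        intro c hc'
        obtain ⟨hc0, hc1, _⟩ := (pvAM_mem cs c).1 hc'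
        exact ⟨c, by omega, by push_cast; omega, Int.emod_eq_of_lt hc0 (by omega)⟩
      omega
  · rw [PySem.List.mem_pyRange_one] at hi₀
    set N : Int := pvNxt cs L (i₀ + 1) with hNdef
    obtain ⟨j1, j2, j3, j4⟩ := pvNxt_spec cs L (L - (i₀ + 1)).toNat (i₀ + 1) (le_refl _)
    rw [← hNdef] at j1 j2 j3 j4
    have hNub : N ≤ L := j2 (by omega)
    have hN1 : i₀ + 1 ≤ N := j1
    rcases le_total (pvY cs i₀) (pvX cs i₀) with hyx | hxy
    · -- pvBest = pvY i₀ : go left L-N steps, turn at marked cell N, go right to i₀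
      have hbest : pvBest cs = pvY cs i₀ := by unfold pvBest; rw [← hLdef, hc]; omega
      set a : Nat := (L - N).toNat with hadef
      set b : Nat := a + i₀.toNat with hbdef
      have hturn : pvCl (pvCheck cs) ((-(a : Int)) % L) = true ∨ a = 0 := by
        by_cases hNL : N = L
        · right; omega
        · left
          have hNlt : N < L := by omega
          have hai : (a : Int) = L - N := by omega
          have : (-(a : Int)) % L = N := by
            rw [hai, show -(L - N) = N - L * 1 by ring, Int.sub_mul_emod_self_left]
            exact Int.emod_eq_of_lt (by omega) hNlt
          rw [this, pvCl_check cs N (by omega) hNlt]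
          exact (pvMarkAt_iff cs N).2 (j4 hNlt)
      obtain ⟨hmem, hg, _⟩ := pvWLR_spec (pvCheck cs) L s0 a hL hs0 hd0 hturn b
      obtain ⟨_, _, _, _, _, hiff, hnd, hclen⟩ := hg
      refine ⟨a + b, ?_, pvWLR (pvCheck cs) L s0 a b, hmem, ?_⟩
      · rw [hbest]; unfold pvY; rw [← hLdef, ← hNdef]; push_cast; omega
      · have hcov : ∀ c ∈ pvAM cs, pvCovers L (-(a : Int)) (max 0 ((b : Int) - a)) c := by
          intro c hc'
          obtain ⟨hc0, hc1, hcm⟩ := (pvAM_mem cs c).1 hc'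
          by_cases hci : c ≤ i₀
          · exact ⟨c, by omega, by omega, Int.emod_eq_of_lt hc0 (by omega)⟩
          · have hcN : N ≤ c := by
              by_contra hcc
              exact ((pvMarkAt_iff cs c).1 hcm) (j3 c (by omega) (by omega))
            refine ⟨c - L, by omega, by omega, ?_⟩
            rw [show c - L = c - L * 1 by ring, Int.sub_mul_emod_self_left]
            exact Int.emod_eq_of_lt hc0 (by omega)
        have := pvCnt_of_covered cs _ (-(a : Int)) (max 0 ((b : Int) - a)) (by omega) hiff hnd hcov
        omega
    · -- pvBest = pvX i₀ : pull i₀ back to the last marked cell i', go right then left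
      have hbest : pvBest cs = pvX cs i₀ := by unfold pvBest; rw [← hLdef, hc]; omega
      set i' : Nat := Nat.findGreatest (fun j => j = 0 ∨ pvMarkAt cs (j : Int) = true) i₀.toNat with hi'def
      have hi'le : i' ≤ i₀.toNat := Nat.findGreatest_le i₀.toNat
      have hi'P : i' = 0 ∨ pvMarkAt cs (i' : Int) = true := by
        rw [hi'def]
        exact Nat.findGreatest_spec (P := fun j => j = 0 ∨ pvMarkAt cs (j : Int) = true)
          (Nat.zero_le _) (Or.inl rfl)
      have hi'gr : ∀ j : Nat, i' < j → j ≤ i₀.toNat → ¬ pvMarkAt cs (j : Int) = true := by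
        intro j hj1 hj2 hP
        exact Nat.findGreatest_is_greatest hj1 hj2 (Or.inr hP)
      have hNeq : pvNxt cs L ((i' : Int) + 1) = N := by
        rw [hNdef]
        apply pvNxt_congr cs L (i₀ + 1 - ((i' : Int) + 1)).toNat ((i' : Int) + 1) (i₀ + 1)
          (le_refl _) (by omega) (by omega)
        intro k hk1 hk2
        have hk0 : 0 ≤ k := by omega
        have := hi'gr k.toNat (by omega) (by omega)
        rw [show ((k.toNat : Nat) : Int) = k by omega] at this
        by_contra hA
        exact this ((pvMarkAt_iff cs k).2 hA)
      set a : Nat := i' with hadef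
      set b : Nat := i' + (L - N).toNat with hbdef
      have hturn : pvCl (pvCheck cs) (((a : Int)) % L) = true ∨ a = 0 := by
        rcases hi'P with h0 | hP
        · right; exact h0
        · left
          have : ((a : Int)) % L = (a : Int) := Int.emod_eq_of_lt (by omega) (by omega)
          rw [this, pvCl_check cs _ (by omega) (by omega)]
          exact hP
      obtain ⟨hmem, hg, _⟩ := pvWRL_spec (pvCheck cs) L s0 a hL hs0 hd0 hturn b
      obtain ⟨_, _, _, _, _, hiff, hnd, hclen⟩ := hg
      refine ⟨a + b, ?_, pvWRL (pvCheck cs) L s0 a b, hmem, ?_⟩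
      · rw [hbest]; unfold pvX; rw [← hLdef, ← hNdef]; push_cast; omega
      · have hcov : ∀ c ∈ pvAM cs, pvCovers L (min 0 ((a : Int) - b)) (a : Int) c := by
          intro c hc'
          obtain ⟨hc0, hc1, hcm⟩ := (pvAM_mem cs c).1 hc'
          by_cases hci : c ≤ (a : Int)
          · exact ⟨c, by omega, by omega, Int.emod_eq_of_lt hc0 (by omega)⟩
          · have hcN : N ≤ c := by
              by_contra hcc
              by_cases hcio : c ≤ i₀
              · have := hi'gr c.toNat (by omega) (by omega)
                rw [show ((c.toNat : Nat) : Int) = c by omega] at this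
                exact this hcm
              · exact ((pvMarkAt_iff cs c).1 hcm) (j3 c (by omega) (by omega))
            refine ⟨c - L, by omega, by omega, ?_⟩
            rw [show c - L = c - L * 1 by ring, Int.sub_mul_emod_self_left]
            exact Int.emod_eq_of_lt hc0 (by omega)
        have := pvCnt_of_covered cs _ (min 0 ((a : Int) - b)) (a : Int) (by omega) hiff hnd hcov
        omega

theorem pvS0_good (clist : List Bool) (L : Int) (hL : 0 < L) :
    pvGood clist L
      ⟨0, if pvCl clist 0 then 1 else 0, 0, if pvCl clist 0 then [0] else []⟩ 0 0 0 := by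
  have hcov : ∀ c : Int, pvCovers L 0 0 c ↔ c = 0 := by
    intro c
    constructor
    · rintro ⟨w, h1, h2, rfl⟩
      have : w = 0 := by omega
      rw [this, Int.zero_emod]
    · rintro rfl
      exact ⟨0, le_refl 0, le_refl 0, Int.zero_emod L⟩
  by_cases h : pvCl clist 0 = true
  · simp only [if_pos h]
    refine ⟨(Int.zero_emod L).symm, le_refl 0, le_refl 0, le_refl 0, le_refl 0, ?_, by simp, by simp⟩
    intro c
    show c ∈ [(0 : Int)] ↔ _
    simp only [List.mem_singleton, hcov c]
    constructor
    · rintro rfl; exact ⟨h, rfl⟩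
    · rintro ⟨_, rfl⟩; rfl
  · simp only [if_neg h]
    refine ⟨(Int.zero_emod L).symm, le_refl 0, le_refl 0, le_refl 0, le_refl 0, ?_, by simp, by simp⟩
    intro c
    show c ∈ ([] : List Int) ↔ _
    simp only [List.not_mem_nil, false_iff, hcov c]
    rintro ⟨hc, rfl⟩
    exact h hc

theorem pvGetMoveCnt_eq (cs : List Char) (hn : 2 ≤ cs.length) :
    pvGetMoveCnt (pvCheck cs) (cs.length : Int) ((pvAM cs).length : Int) = pvBest cs := by
  set L : Int := (cs.length : Int) with hLdef
  have hL : 0 < L := by omega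
  set clist : List Bool := pvCheck cs with hcldef
  set s0 : PvSt :=
    ⟨0, if pvCl clist 0 then 1 else 0, 0, if pvCl clist 0 then [0] else []⟩ with hs0def
  have hs0 : pvGood clist L s0 0 0 0 := pvS0_good clist L hL
  have hd0 : s0.dir = 0 := rfl
  obtain ⟨k, hk, hkfull⟩ := pvUp cs s0 hn hs0 hd0
  have hex : ∃ m : Nat, ∃ s ∈ pvLvl clist L s0 m, s.cnt = ((pvAM cs).length : Int) := ⟨k, hkfull⟩
  set μ : Nat := Nat.find hex with hμdef
  have hfull := Nat.find_spec hex
  have hmin : ∀ m, m < μ → ¬ ∃ s ∈ pvLvl clist L s0 m, s.cnt = ((pvAM cs).length : Int) :=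
    fun m hm => Nat.find_min hex hm
  have hμk : μ ≤ k := Nat.find_min' hex hkfull
  have hlow : pvBest cs ≤ (μ : Int) := by
    obtain ⟨s, hs1, hs2⟩ := hfull
    exact pvLow cs s0 hn hs0 hd0 μ s hs1 hs2
  have hμb : (μ : Int) = pvBest cs := by
    have : (μ : Int) ≤ (k : Int) := by exact_mod_cast hμk
    omega
  have hμlt : μ < 0 + (L.toNat + 2) := by
    have hinit : pvBest cs ≤ L - 1 := by
      unfold pvBest; rw [← hLdef]; exact pvFoldMin_le_init (pvX cs) (pvY cs) _ _
    omega
  have hrun := pvBfs_run clist L ((pvAM cs).length : Int) s0 μ hfull hmin (L.toNat + 2) 0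
    (Nat.zero_le μ) hμlt
  show pvBfs clist L ((pvAM cs).length : Int) (L.toNat + 2) [s0] 0 = pvBest cs
  have hlvl0 : pvLvl clist L s0 0 = [s0] := rfl
  rw [← hlvl0, show (0 : Int) = ((0 : Nat) : Int) by rfl, hrun, hμb]


def pvCheckPre (cs : List Char) (i : Nat) : List Bool :=
  (List.range i).map (fun j : Nat => pvMarkAt cs (j : Int))
def pvAMPre (cs : List Char) (i : Nat) : List Int :=
  ((List.range i).map (fun j : Nat => (j : Int))).filter (fun c => pvMarkAt cs c)
def pvVertPre (cs : List Char) (i : Nat) : Int :=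
  ((cs.take i).filter (fun c => c ≠ 'A')).foldl (fun a c => a + pvGetUpdown c) 0

theorem pvSetAppend {α : Type} (l₁ : List α) (l₂ : List α) (x v : α) :
    (l₁ ++ x :: l₂).set l₁.length v = l₁ ++ v :: l₂ := by
  induction l₁ with
  | nil => rfl
  | cons a t ih => simp [ih]

theorem pvFoldA (cs : List Char) :
    ∀ i : Nat, i ≤ cs.length →
      (PySem.List.pyRange 0 (i : Int) 1).foldl (pvAbody cs)
          (0, 0, List.replicate cs.length false) =
        (pvVertPre cs i, ((pvAMPre cs i).length : Int),
          pvCheckPre cs i ++ List.replicate (cs.length - i) false) := by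
  intro i
  induction i with
  | zero =>
    intro _
    simp [PySem.List.pyRange_one_eq_nil, pvVertPre, pvAMPre, pvCheckPre]
  | succ i ih =>
    intro hle
    have hi : i < cs.length := by omega
    have hrange : PySem.List.pyRange 0 ((i + 1 : Nat) : Int) 1 =
        PySem.List.pyRange 0 (i : Int) 1 ++ [(i : Int)] := by
      rw [show ((i + 1 : Nat) : Int) = (i : Int) + 1 by push_cast; ring]
      exact PySem.List.pyRange_one_succ_right (by omega)
    rw [hrange, List.foldl_append, ih (by omega)]
    have hch : (PySem.List.pyGet? cs ((i : Nat) : Int)).getD ' ' = cs[i] := by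
      rw [PySem.List.pyGet?_natCast, List.getElem?_eq_getElem hi]
      rfl
    have htake : cs.take (i + 1) = cs.take i ++ [cs[i]] := by
      rw [List.take_add_one, List.getElem?_eq_getElem hi]
      rfl
    have hrangeN : List.range (i + 1) = List.range i ++ [i] := List.range_succ
    have hrep : List.replicate (cs.length - i) false =
        false :: List.replicate (cs.length - (i + 1)) false := by
      rw [show cs.length - i = (cs.length - (i + 1)) + 1 by omega]
      rfl
    have hcl : (pvCheckPre cs i).length = i := by simp [pvCheckPre]
    show pvAbody cs _ _ = _
    unfold pvAbody
    simp only [hch]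
    by_cases hA : cs[i] ≠ 'A'
    · rw [if_pos hA]
      have hmark : pvMarkAt cs ((i : Nat) : Int) = true := by
        rw [pvMarkAt_iff]
        unfold pvChAt
        rw [hch]
        exact hA
      refine Prod.ext ?_ (Prod.ext ?_ ?_)
      · show pvVertPre cs i + pvGetUpdown cs[i] = pvVertPre cs (i + 1)
        unfold pvVertPre
        rw [htake, List.filter_append, List.foldl_append]
        simp [hA]
      · show ((pvAMPre cs i).length : Int) + 1 = ((pvAMPre cs (i + 1)).length : Int)
        unfold pvAMPre
        rw [hrangeN]
        simp [hmark]
      · show ((pvCheckPre cs i ++ List.replicate (cs.length - i) false).set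
            ((i : Nat) : Int).toNat true) = pvCheckPre cs (i + 1) ++ List.replicate (cs.length - (i + 1)) false
        have hset := pvSetAppend (pvCheckPre cs i)
          (List.replicate (cs.length - (i + 1)) false) false true
        rw [hcl] at hset
        rw [hrep, Int.toNat_natCast, hset]
        unfold pvCheckPre
        rw [hrangeN]
        simp [hmark]
    · rw [if_neg hA]
      have hmark : pvMarkAt cs ((i : Nat) : Int) = false := by
        rw [← Bool.not_eq_true, pvMarkAt_iff]
        unfold pvChAt
        rw [hch]
        simpa using hA
      refine Prod.ext ?_ (Prod.ext ?_ ?_)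
      · show pvVertPre cs i = pvVertPre cs (i + 1)
        unfold pvVertPre
        rw [htake, List.filter_append, List.foldl_append]
        simp at hA
        simp [hA]
      · show ((pvAMPre cs i).length : Int) = ((pvAMPre cs (i + 1)).length : Int)
        unfold pvAMPre
        rw [hrangeN]
        simp [hmark]
      · show pvCheckPre cs i ++ List.replicate (cs.length - i) false =
            pvCheckPre cs (i + 1) ++ List.replicate (cs.length - (i + 1)) false
        rw [hrep]
        unfold pvCheckPre
        rw [hrangeN]
        simp [hmark]

theorem pvBbody_eq (cs : List Char) :
    pvBbody cs (cs.length : Int) = (fun b i => min (min b (pvX cs i)) (pvY cs i)) := rfl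

theorem pvVert_eq (cs : List Char) :
    (cs.filter (fun c => c ≠ 'A')).foldl (fun a c => a + pvUpdownAlt c) 0 = pvVertPre cs cs.length := by
  unfold pvVertPre
  rw [List.take_length]
  rfl

theorem solution_main (name : String) (hp : name.toList ≠ []) :
    solution name = solution_alt name := by
  have hlen := PySem.List.len_eq name.toList
  by_cases h1 : name.toList.length = 1
  · unfold solution solution_alt
    have hc : ((name.toList.length : Int) == (1 : Int)) = true := by
      simp [h1]
    simp only [hlen, hc, if_true]
    rfl
  · have hn : 2 ≤ name.toList.length := by
      have : name.toList.length ≠ 0 := by simpa using hp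
      omega
    have hc : ((name.toList.length : Int) == (1 : Int)) = false := by
      simp only [beq_eq_false_iff_ne, ne_eq]
      omega
    unfold solution solution_alt
    simp only [hlen, hc, Bool.false_eq_true, if_false, Int.toNat_natCast]
    rw [pvFoldA name.toList name.toList.length (le_refl _)]
    simp only [Nat.sub_self, List.replicate_zero, List.append_nil]
    show pvVertPre name.toList name.toList.length +
        pvGetMoveCnt (pvCheck name.toList) (name.toList.length : Int) ((pvAM name.toList).length : Int) =
      (name.toList.filter (fun c => c ≠ 'A')).foldl (fun a c => a + pvUpdownAlt c) 0 +
        (PySem.List.pyRange 0 (name.toList.length : Int) 1).foldl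
          (pvBbody name.toList (name.toList.length : Int)) ((name.toList.length : Int) - 1)
    rw [pvGetMoveCnt_eq name.toList hn, pvVert_eq, pvBbody_eq]
    rfl

-- ===== VERDICT (by name: the statement is the Claim_ definition above) =====
theorem solution_spec : Claim_equal_solution := by
  intro name _ hp
  show solution name = solution_alt name
  exact solution_main name hp
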